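-- pv_equiv track=rewrite | github.com/meta-organvm/organvm-engine | src/organvm_engine/governance/dictums.py | _extract_organ_from_produces_entry
-- ===== SOURCE A (Python) =====
-- def _extract_organ_from_produces_entry(entry: str) -> str | None:
--     """Extract target organ from a produces entry.
--
--     Handles formats like:
--     - "ORGAN-V"
--     - "organvm-v-logos/some-repo"
--     - "organvm-v-logos"
--     """
--     entry = entry.strip()
--
--     if entry.startswith("ORGAN-"):
--         return entry
--
--     org_part = entry.split("/")[0] if "/" in entry else entry
--
--     if not org_part.startswith("organvm-"):
--         return None
--
--     suffix = org_part.replace("organvm-", "", 1).lower()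
--
--     organ_mapping = {
--         "vii": "ORGAN-VII",
--         "vi": "ORGAN-VI",
--         "v": "ORGAN-V",
--         "iv": "ORGAN-IV",
--         "iii": "ORGAN-III",
--         "ii": "ORGAN-II",
--         "i": "ORGAN-I",
--     }
--
--     for key, value in organ_mapping.items():
--         if suffix.startswith(key):
--             rest = suffix[len(key) :]
--             if not rest or not rest[0].isalpha():
--                 return value
--
--     return None
--
--     return None
-- ===== SOURCE B (Python) =====
-- ROMAN_TOKENS = ("i", "ii", "iii", "iv", "v", "vi", "vii")
--
--
-- def _extract_organ_from_produces_entry(entry: str) -> str | None: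
--     entry = entry.strip()
--
--     if entry.startswith("ORGAN-"):
--         return entry
--
--     org_part = entry.partition("/")[0]
--
--     if not org_part.startswith("organvm-"):
--         return None
--
--     suffix = org_part[len("organvm-"):].lower()
--
--     # maximal leading alphabetic run of the suffix, by index
--     i = 0
--     while i < len(suffix) and suffix[i].isalpha():
--         i += 1
--     token = suffix[:i]
--
--     # exact membership test, then build the answer from the token itself
--     return "ORGAN-" + token.upper() if token in ROMAN_TOKENS else None
-- ===== Notes on version B (the rewrite author's own statement) =====
-- stated objective: simpler
-- what changed: A's ordered greedy startswith-scan over a seven-entry mapping is replaced by a partition-based prefix split, an index loop extracting the maximal leading alphabetic run, and one exact membership test that builds the answer as 'ORGAN-' + token.upper() instead of looking it up.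
import Mathlib
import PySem

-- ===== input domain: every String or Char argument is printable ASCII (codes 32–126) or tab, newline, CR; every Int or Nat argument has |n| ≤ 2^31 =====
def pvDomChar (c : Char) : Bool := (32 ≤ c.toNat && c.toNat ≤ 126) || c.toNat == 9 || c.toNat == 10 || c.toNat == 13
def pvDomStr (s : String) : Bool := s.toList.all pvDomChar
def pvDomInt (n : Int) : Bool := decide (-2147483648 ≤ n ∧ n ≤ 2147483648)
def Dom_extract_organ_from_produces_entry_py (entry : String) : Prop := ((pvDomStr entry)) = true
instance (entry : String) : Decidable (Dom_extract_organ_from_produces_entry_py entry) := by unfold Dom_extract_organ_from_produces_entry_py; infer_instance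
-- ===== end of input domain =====

-- B replaces A's ordered greedy startswith-scan over the mapping by a partition-based
-- prefix split, an index loop extracting the maximal leading alphabetic run, and one
-- exact membership test that builds the answer from the token itself (simpler).


-- ===== PORT A =====
-- hand port of str.replace(old, "", 1): removes the first occurrence of old; exact for nonempty old
-- (A only calls it with old = "organvm-")
def pvReplaceOnce (s old : List Char) : List Char :=
  match s with
  | [] => []
  | c :: t => if old.isPrefixOf (c :: t) then (c :: t).drop old.length else c :: pvReplaceOnce t old

-- "not rest or not rest[0].isalpha()" (rest[0] is only read when rest is nonempty)
def pvRestOk (rest : List Char) : Bool :=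
  match rest with
  | [] => true
  | c :: _ => !PySem.Chars.isalpha c

-- the for-loop over organ_mapping.items(): return value on the first key that matches
def pvLoopA (s : List Char) : List (List Char × String) → Option String
  | [] => none
  | (k, v) :: ms =>
    -- rest = suffix[len(key):]  (List.drop is exact for this nonnegative slice start)
    if PySem.Chars.startswith s k && pvRestOk (s.drop k.length) then some v
    else pvLoopA s ms

def pvOrganMappingA : List (List Char × String) :=
  [("vii".toList, "ORGAN-VII"), ("vi".toList, "ORGAN-VI"), ("v".toList, "ORGAN-V"),
   ("iv".toList, "ORGAN-IV"), ("iii".toList, "ORGAN-III"), ("ii".toList, "ORGAN-II"),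
   ("i".toList, "ORGAN-I")]

def extract_organ_from_produces_entry_py (entry : String) : Option String :=
  let e := PySem.Chars.strip entry.toList
  if PySem.Chars.startswith e "ORGAN-".toList then some (String.ofList e)
  else
    -- entry.split("/")[0]: split on a nonempty separator is never empty, so headD is exact
    let org := if PySem.Chars.isIn "/".toList e then (PySem.Chars.splitOn e "/".toList).headD [] else e
    if !PySem.Chars.startswith org "organvm-".toList then none
    else
      pvLoopA (PySem.Chars.lower (pvReplaceOnce org "organvm-".toList)) pvOrganMappingA

-- ===== PORT B =====
-- entry.partition("/")[0]: the characters before the first '/' (the whole string if none)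
def pvBeforeSlash : List Char → List Char
  | [] => []
  | c :: t => if c = '/' then [] else c :: pvBeforeSlash t

-- the while loop "i = 0; while i < len(suffix) and suffix[i].isalpha(): i += 1":
-- the final index i, i.e. the length of the maximal leading alphabetic run
def pvAlphaRunLen : List Char → Nat
  | [] => 0
  | c :: t => if PySem.Chars.isalpha c then pvAlphaRunLen t + 1 else 0

def pvRomanTokens : List (List Char) :=
  ["i".toList, "ii".toList, "iii".toList, "iv".toList, "v".toList, "vi".toList, "vii".toList]

def extract_organ_from_produces_entry_py_alt (entry : String) : Option String :=
  let e := PySem.Chars.strip entry.toList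
  if PySem.Chars.startswith e "ORGAN-".toList then some (String.ofList e)
  else
    let org := pvBeforeSlash e
    if !PySem.Chars.startswith org "organvm-".toList then none
    else
      -- org_part[len("organvm-"):] and suffix[:i] (List.drop/take are exact for these nonnegative slice bounds)
      let suffix := PySem.Chars.lower (org.drop "organvm-".toList.length)
      let token := suffix.take (pvAlphaRunLen suffix)
      if pvRomanTokens.contains token then
        some (String.ofList ("ORGAN-".toList ++ PySem.Chars.upper token))
      else none

-- ===== PRECONDITION & SPEC =====
def Spec_extract_organ_from_produces_entry_py (entry : String) (out : Option String) : Prop := out = extract_organ_from_produces_entry_py_alt entry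
instance (entry : String) (out : Option String) : Decidable (Spec_extract_organ_from_produces_entry_py entry out) := by unfold Spec_extract_organ_from_produces_entry_py; infer_instance

-- ===== CLAIM (what is proved, stated in full; the proofs are below) =====
def Claim_equal_extract_organ_from_produces_entry_py : Prop := ∀ (entry : String), Dom_extract_organ_from_produces_entry_py entry → Spec_extract_organ_from_produces_entry_py entry (extract_organ_from_produces_entry_py entry)

-- ===== LEMMAS AND PROOFS =====

-- ---- the two org_part computations agree ----

lemma pvGo_append (sep : List Char) (fuel : Nat) (l cur acc : List Char) (accs : List (List Char)) :
    PySem.Chars.splitOn.go sep fuel l cur (acc :: accs)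
      = (acc :: accs).reverse ++ PySem.Chars.splitOn.go sep fuel l cur [] := by
  induction fuel generalizing l cur acc accs with
  | zero => simp [PySem.Chars.splitOn.go]
  | succ fuel ih =>
    cases l with
    | nil => simp [PySem.Chars.splitOn.go]
    | cons c t =>
      by_cases hp : sep.isPrefixOf (c :: t) = true
      · rw [PySem.Chars.splitOn.go, if_pos hp]
        conv_rhs => rw [PySem.Chars.splitOn.go, if_pos hp]
        rw [ih, ih]
        simp
      · rw [PySem.Chars.splitOn.go, if_neg hp]
        conv_rhs => rw [PySem.Chars.splitOn.go, if_neg hp]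
        exact ih ..

lemma pvGo_head (fuel : Nat) (l cur : List Char) (h : l.length < fuel) :
    (PySem.Chars.splitOn.go "/".toList fuel l cur []).headD [] = cur.reverse ++ pvBeforeSlash l := by
  induction fuel generalizing l cur with
  | zero => omega
  | succ fuel ih =>
    cases l with
    | nil => simp [PySem.Chars.splitOn.go, pvBeforeSlash]
    | cons c t =>
      by_cases hc : c = '/'
      · subst hc
        rw [PySem.Chars.splitOn.go,
          if_pos ((List.isPrefixOf_iff_prefix).mpr (by simp [List.cons_prefix_cons]))]
        rw [pvGo_append]
        simp [pvBeforeSlash]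
      · rw [PySem.Chars.splitOn.go, if_neg (by
          simp [List.isPrefixOf_iff_prefix, List.cons_prefix_cons]
          intro h'; exact hc h'.symm)]
        rw [ih t (c :: cur) (by simp at h ⊢; omega)]
        simp [pvBeforeSlash, hc]

lemma pvSplitHead (e : List Char) :
    (PySem.Chars.splitOn e "/".toList).headD [] = pvBeforeSlash e := by
  have := pvGo_head (e.length + 1) e [] (by omega)
  simpa [PySem.Chars.splitOn] using this

lemma pvBeforeSlash_of_not_isIn (e : List Char) (h : PySem.Chars.isIn "/".toList e = false) :
    pvBeforeSlash e = e := by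
  induction e with
  | nil => rfl
  | cons c t ih =>
    rw [PySem.Chars.isIn_eq_false_iff] at h
    have hc : c ≠ '/' := by
      rintro rfl
      exact h ⟨[], t, rfl⟩
    have ht : PySem.Chars.isIn "/".toList t = false := by
      rw [PySem.Chars.isIn_eq_false_iff]
      intro hinf
      exact h (hinf.trans (List.infix_cons List.infix_rfl))
    simp [pvBeforeSlash, hc, ih ht]

lemma pvOrg_eq (e : List Char) :
    (if PySem.Chars.isIn "/".toList e then (PySem.Chars.splitOn e "/".toList).headD [] else e)
      = pvBeforeSlash e := by
  by_cases h : PySem.Chars.isIn "/".toList e = true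
  · rw [if_pos h, pvSplitHead]
  · rw [if_neg h, pvBeforeSlash_of_not_isIn e (by simpa using h)]

-- ---- A's replace-once equals B's drop on the organvm- prefix ----

lemma pvReplaceOnce_of_prefix (s p : List Char) (hp : p ≠ []) (h : p <+: s) :
    pvReplaceOnce s p = s.drop p.length := by
  cases s with
  | nil => simp [List.prefix_nil] at h; exact absurd h hp
  | cons c t => simp [pvReplaceOnce, (List.isPrefixOf_iff_prefix).mpr h]

-- ---- A's greedy key scan equals B's token extraction + membership test ----

lemma pvTake_alphaRun_eq_iff (k : List Char) (hk : ∀ c ∈ k, PySem.Chars.isalpha c = true) (l : List Char) :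
    l.take (pvAlphaRunLen l) = k ↔ (k <+: l ∧ pvRestOk (l.drop k.length) = true) := by
  induction k generalizing l with
  | nil =>
    cases l with
    | nil => simp [pvAlphaRunLen, pvRestOk]
    | cons c t =>
      by_cases hc : PySem.Chars.isalpha c = true <;>
        simp [pvAlphaRunLen, pvRestOk, hc]
  | cons a k' ih =>
    have ha : PySem.Chars.isalpha a = true := hk a (List.mem_cons_self ..)
    cases l with
    | nil => simp [pvAlphaRunLen]
    | cons c t =>
      by_cases hc : PySem.Chars.isalpha c = true
      · have ih' := ih (fun x hx => hk x (List.mem_cons_of_mem _ hx)) t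
        have hpv : (c :: t).take (pvAlphaRunLen (c :: t)) = c :: t.take (pvAlphaRunLen t) := by
          simp [pvAlphaRunLen, hc]
        have hdrop : (c :: t).drop (a :: k').length = t.drop k'.length := by simp
        rw [hpv, hdrop, List.cons_prefix_cons]
        constructor
        · intro h
          injection h with h1 h2
          have h3 := ih'.mp h2
          exact ⟨⟨h1.symm, h3.1⟩, h3.2⟩
        · rintro ⟨⟨h1, h2⟩, h3⟩
          rw [h1, ih'.mpr ⟨h2, h3⟩]
      · have hpv : (c :: t).take (pvAlphaRunLen (c :: t)) = [] := by simp [pvAlphaRunLen, hc]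
        rw [hpv]
        constructor
        · intro h
          exact absurd h.symm (List.cons_ne_nil a k')
        · rintro ⟨h1, -⟩
          rw [List.cons_prefix_cons] at h1
          exact absurd (h1.1 ▸ ha) hc

lemma pvCond_iff (k : List Char) (hk : ∀ c ∈ k, PySem.Chars.isalpha c = true) (l : List Char) :
    ((PySem.Chars.startswith l k && pvRestOk (l.drop k.length)) = true) ↔ l.take (pvAlphaRunLen l) = k := by
  rw [pvTake_alphaRun_eq_iff k hk l, Bool.and_eq_true, PySem.Chars.startswith_iff]

lemma pvLoop_eq_tokenLookup (l : List Char) :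
    pvLoopA l pvOrganMappingA
      = (if pvRomanTokens.contains (l.take (pvAlphaRunLen l)) then
           some (String.ofList ("ORGAN-".toList ++ PySem.Chars.upper (l.take (pvAlphaRunLen l))))
         else none) := by
  have h7 := pvCond_iff "vii".toList (by intro c hc; simp at hc; rcases hc with rfl | rfl | rfl <;> decide) l
  have h6 := pvCond_iff "vi".toList (by intro c hc; simp at hc; rcases hc with rfl | rfl <;> decide) l
  have h5 := pvCond_iff "v".toList (by intro c hc; simp at hc; rcases hc with rfl; decide) l
  have h4 := pvCond_iff "iv".toList (by intro c hc; simp at hc; rcases hc with rfl | rfl <;> decide) l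
  have h3 := pvCond_iff "iii".toList (by intro c hc; simp at hc; rcases hc with rfl | rfl | rfl <;> decide) l
  have h2 := pvCond_iff "ii".toList (by intro c hc; simp at hc; rcases hc with rfl | rfl <;> decide) l
  have h1 := pvCond_iff "i".toList (by intro c hc; simp at hc; rcases hc with rfl; decide) l
  simp only [pvLoopA, pvOrganMappingA]
  by_cases e7 : l.take (pvAlphaRunLen l) = "vii".toList
  · rw [if_pos (h7.mpr e7), e7, if_pos (by decide)]; decide
  by_cases e6 : l.take (pvAlphaRunLen l) = "vi".toList
  · rw [if_neg (e7 ∘ h7.mp), if_pos (h6.mpr e6), e6, if_pos (by decide)]; decide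
  by_cases e5 : l.take (pvAlphaRunLen l) = "v".toList
  · rw [if_neg (e7 ∘ h7.mp), if_neg (e6 ∘ h6.mp), if_pos (h5.mpr e5), e5, if_pos (by decide)]; decide
  by_cases e4 : l.take (pvAlphaRunLen l) = "iv".toList
  · rw [if_neg (e7 ∘ h7.mp), if_neg (e6 ∘ h6.mp), if_neg (e5 ∘ h5.mp),
      if_pos (h4.mpr e4), e4, if_pos (by decide)]; decide
  by_cases e3 : l.take (pvAlphaRunLen l) = "iii".toList
  · rw [if_neg (e7 ∘ h7.mp), if_neg (e6 ∘ h6.mp), if_neg (e5 ∘ h5.mp),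
      if_neg (e4 ∘ h4.mp), if_pos (h3.mpr e3), e3, if_pos (by decide)]; decide
  by_cases e2 : l.take (pvAlphaRunLen l) = "ii".toList
  · rw [if_neg (e7 ∘ h7.mp), if_neg (e6 ∘ h6.mp), if_neg (e5 ∘ h5.mp),
      if_neg (e4 ∘ h4.mp), if_neg (e3 ∘ h3.mp), if_pos (h2.mpr e2), e2, if_pos (by decide)]; decide
  by_cases e1 : l.take (pvAlphaRunLen l) = "i".toList
  · rw [if_neg (e7 ∘ h7.mp), if_neg (e6 ∘ h6.mp), if_neg (e5 ∘ h5.mp),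
      if_neg (e4 ∘ h4.mp), if_neg (e3 ∘ h3.mp), if_neg (e2 ∘ h2.mp),
      if_pos (h1.mpr e1), e1, if_pos (by decide)]; decide
  · rw [if_neg (e7 ∘ h7.mp), if_neg (e6 ∘ h6.mp), if_neg (e5 ∘ h5.mp),
      if_neg (e4 ∘ h4.mp), if_neg (e3 ∘ h3.mp), if_neg (e2 ∘ h2.mp),
      if_neg (e1 ∘ h1.mp), if_neg (by
        intro hcon
        simp only [pvRomanTokens, List.contains_cons, List.contains_nil,
          Bool.or_eq_true, beq_iff_eq] at hcon
        rcases hcon with h | h | h | h | h | h | h | h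
        · exact e1 (h.trans (by decide))
        · exact e2 (h.trans (by decide))
        · exact e3 (h.trans (by decide))
        · exact e4 (h.trans (by decide))
        · exact e5 (h.trans (by decide))
        · exact e6 (h.trans (by decide))
        · exact e7 (h.trans (by decide))
        · simp at h)]

-- ===== VERDICT (by name: the statement is the Claim_ definition above) =====
theorem extract_organ_from_produces_entry_py_spec : Claim_equal_extract_organ_from_produces_entry_py := by
  intro entry _
  unfold Spec_extract_organ_from_produces_entry_py
  simp only [extract_organ_from_produces_entry_py, extract_organ_from_produces_entry_py_alt]
  by_cases h1 : PySem.Chars.startswith (PySem.Chars.strip entry.toList) "ORGAN-".toList = true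
  · rw [if_pos h1, if_pos h1]
  · rw [if_neg h1, if_neg h1, pvOrg_eq]
    set org := pvBeforeSlash (PySem.Chars.strip entry.toList) with horg
    by_cases h2 : PySem.Chars.startswith org "organvm-".toList = true
    · rw [if_neg (by rw [h2]; decide), if_neg (by rw [h2]; decide),
        pvReplaceOnce_of_prefix _ _ (by decide) ((PySem.Chars.startswith_iff _ _).mp h2)]
      exact pvLoop_eq_tokenLookup _
    · rw [Bool.not_eq_true] at h2
      rw [if_pos (by rw [h2]; decide), if_pos (by rw [h2]; decide)]
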